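-- pv_equiv track=rewrite | github.com/JacksonDagger/adventofcode2021 | day3/day3.py | parse_bin_str
-- ===== SOURCE A (Python) =====
-- def parse_bin_str(strnum):
--     ret = 0
--     for c in strnum:
--         if c != "1" and c != "0":
--             break
--         ret = ret << 1
--         if c == "1":
--             ret += 1
--     return ret
-- ===== SOURCE B (Python) =====
-- def parse_bin_str(strnum):
--     n = 0
--     while n < len(strnum) and strnum[n] in "01":
--         n += 1
--     return sum(1 << i for i, c in enumerate(reversed(strnum[:n])) if c == "1")
-- ===== Notes on version B (the rewrite author's own statement) =====
-- stated objective: alternative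
-- what changed: Replaces A's interleaved shift-and-add loop with a breaking scan by a two-phase decomposition: locate the maximal binary-digit prefix, then sum 1<<i place values over the reversed prefix.
import Mathlib
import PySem

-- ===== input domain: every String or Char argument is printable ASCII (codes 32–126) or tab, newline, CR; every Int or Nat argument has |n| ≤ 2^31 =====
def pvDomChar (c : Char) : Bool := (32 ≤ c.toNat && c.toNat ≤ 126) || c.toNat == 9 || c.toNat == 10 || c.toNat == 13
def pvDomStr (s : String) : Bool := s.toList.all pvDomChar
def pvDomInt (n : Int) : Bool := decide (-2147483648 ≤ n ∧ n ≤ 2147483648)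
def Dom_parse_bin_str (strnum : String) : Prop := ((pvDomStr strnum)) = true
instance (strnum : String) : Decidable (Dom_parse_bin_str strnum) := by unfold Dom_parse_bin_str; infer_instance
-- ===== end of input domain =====

-- B replaces A's interleaved shift-and-add loop (with break) by a two-phase
-- decomposition: find the maximal binary prefix, then sum 1<<i place values
-- over the reversed prefix (objective: alternative structure, same cost).


-- ===== PORT A =====
-- 'for c in strnum' with break; ret = ret << 1; if c == "1": ret += 1
def pvGoA : List Char → Int → Int
  | [], ret => ret
  | c :: cs, ret =>
      if c ≠ '1' ∧ c ≠ '0' then ret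
      else
        let ret := ret * 2
        let ret := if c = '1' then ret + 1 else ret
        pvGoA cs ret

def parse_bin_str (strnum : String) : Int := pvGoA strnum.toList 0

-- ===== PORT B =====
-- phase 1: maximal prefix of "01" chars (the while-loop index scan);
-- phase 2: sum(1 << i for i, c in enumerate(reversed(prefix)) if c == "1")
def parse_bin_str_alt (strnum : String) : Int :=
  let pre := strnum.toList.takeWhile (fun c => c == '0' || c == '1')
  (PySem.List.enumerate pre.reverse 0).foldl
    (fun acc p => if p.2 == '1' then acc + 2 ^ p.1.toNat else acc) 0

-- ===== PRECONDITION & SPEC =====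
def Spec_parse_bin_str (strnum : String) (out : Int) : Prop := out = parse_bin_str_alt strnum
instance (strnum : String) (out : Int) : Decidable (Spec_parse_bin_str strnum out) := by unfold Spec_parse_bin_str; infer_instance

-- ===== CLAIM (what is proved, stated in full; the proofs are below) =====
def Claim_equal_parse_bin_str : Prop := ∀ (strnum : String), Dom_parse_bin_str strnum → Spec_parse_bin_str strnum (parse_bin_str strnum)

-- ===== LEMMAS AND PROOFS =====

-- msb-first accumulator value of a pure binary-digit list (A's loop without the break)
def pvW : Int → List Char → Int
  | r, [] => r
  | r, c :: cs => pvW (if c = '1' then r * 2 + 1 else r * 2) cs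

-- lsb-weighted sum with starting exponent k (B's enumerated sum)
def pvT : List Char → Nat → Int
  | [], _ => 0
  | c :: cs, k => (if c = '1' then (1 : Int) else 0) * 2 ^ k + pvT cs (k + 1)

theorem pvGoA_eq_W (l : List Char) : ∀ r,
    pvGoA l r = pvW r (l.takeWhile (fun c => c == '0' || c == '1')) := by
  induction l with
  | nil => intro r; rfl
  | cons c cs ih =>
      intro r
      by_cases h : c ≠ '1' ∧ c ≠ '0'
      · have hb : (c == '0' || c == '1') = false := by
          simp [h.1, h.2]
        simp [pvGoA, h, List.takeWhile_cons, hb, pvW]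
      · have hc : c = '1' ∨ c = '0' := by tauto
        have hb : (c == '0' || c == '1') = true := by
          rcases hc with h1 | h0
          · simp [h1]
          · simp [h0]
        simp only [pvGoA, if_neg h, List.takeWhile_cons, hb, if_true, pvW]
        rcases hc with h1 | h0
        · simp [h1, ih]
        · simp [h0, ih]

theorem pvW_acc (l : List Char) : ∀ r, pvW r l = r * 2 ^ l.length + pvW 0 l := by
  induction l with
  | nil => intro r; simp [pvW]
  | cons c cs ih =>
      intro r
      simp only [pvW, List.length_cons]
      rw [ih, ih (if c = '1' then 0 * 2 + 1 else 0 * 2)]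
      split_ifs <;> ring

theorem pvFold_eq_T (l : List Char) : ∀ (k : Nat) (acc : Int),
    (PySem.List.enumerate l (k : Int)).foldl
      (fun acc p => if p.2 == '1' then acc + 2 ^ p.1.toNat else acc) acc
    = acc + pvT l k := by
  induction l with
  | nil => intro k acc; simp [PySem.List.enumerate_nil, pvT]
  | cons c cs ih =>
      intro k acc
      have hcast : (k : Int) + 1 = ((k + 1 : Nat) : Int) := by push_cast; ring
      simp only [PySem.List.enumerate_cons, List.foldl_cons, hcast, ih, pvT]
      by_cases h : c = '1'
      · simp [h]; ring
      · simp [h]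

theorem pvT_append (c : Char) (l : List Char) : ∀ k : Nat,
    pvT (l ++ [c]) k = pvT l k + (if c = '1' then (1 : Int) else 0) * 2 ^ (k + l.length) := by
  induction l with
  | nil => intro k; simp [pvT]
  | cons d ds ih =>
      intro k
      simp only [List.cons_append, pvT, ih (k + 1), List.length_cons]
      have he : k + 1 + ds.length = k + (ds.length + 1) := by omega
      rw [he]
      ring

theorem pvT_reverse (l : List Char) : ∀ k : Nat, pvT l.reverse k = pvW 0 l * 2 ^ k := by
  induction l with
  | nil => intro k; simp [pvT, pvW]
  | cons c cs ih =>
      intro k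
      rw [List.reverse_cons, pvT_append, ih, List.length_reverse]
      have : pvW 0 (c :: cs) = (if c = '1' then (1 : Int) else 0) * 2 ^ cs.length + pvW 0 cs := by
        simp only [pvW]
        rw [pvW_acc]
        split_ifs <;> ring
      rw [this, pow_add]
      ring

-- ===== VERDICT (by name: the statement is the Claim_ definition above) =====
theorem parse_bin_str_spec : Claim_equal_parse_bin_str := by
  intro s _
  unfold Spec_parse_bin_str parse_bin_str parse_bin_str_alt
  have h0 : ((0 : Int)) = ((0 : Nat) : Int) := rfl
  rw [pvGoA_eq_W, h0, pvFold_eq_T, pvT_reverse]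
  simp
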